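-- pv_equiv track=rewrite | github.com/necropolis0079/CosmosAluminium | lambda/status/handler.py | get_steps_with_state
-- ===== SOURCE A (Python) =====
-- PROCESSING_STEPS = [
--     {"status": "uploading", "label": "Uploading", "description": "Uploading CV to storage"},
--     {"status": "pending", "label": "Queued", "description": "CV queued for processing"},
--     {"status": "extracting", "label": "Extracting", "description": "Extracting text from document"},
--     {"status": "parsing", "label": "Parsing", "description": "AI parsing CV content"},
--     {"status": "mapping", "label": "Mapping", "description": "Mapping skills to taxonomy"},
--     {"status": "storing", "label": "Storing", "description": "Saving to database"},
--     {"status": "indexing", "label": "Indexing", "description": "Indexing for search"},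
--     {"status": "completed", "label": "Completed", "description": "Processing complete"},
-- ]
--
-- STATUS_ORDER = {step["status"]: i for i, step in enumerate(PROCESSING_STEPS)}
--
-- def get_steps_with_state(current_status: str) -> list:
--     """Get steps array with current state indicators."""
--     current_idx = STATUS_ORDER.get(current_status, -1)
--     is_failed = current_status == "failed"
--     is_completed = current_status == "completed"
--
--     steps = []
--     for i, step in enumerate(PROCESSING_STEPS):
--         if is_failed:
--             state = "failed" if i == current_idx else ("completed" if i < current_idx else "pending")
--         elif is_completed:
--             # All steps are completed when status is "completed"
--             state = "completed"
--         elif i < current_idx: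
--             state = "completed"
--         elif i == current_idx:
--             state = "current"
--         else:
--             state = "pending"
--
--         steps.append({
--             "status": step["status"],
--             "label": step["label"],
--             "description": step["description"],
--             "state": state,
--         })
--
--     return steps
-- ===== SOURCE B (Python) =====
-- PROCESSING_STEPS = [
--     {"status": "uploading", "label": "Uploading", "description": "Uploading CV to storage"},
--     {"status": "pending", "label": "Queued", "description": "CV queued for processing"},
--     {"status": "extracting", "label": "Extracting", "description": "Extracting text from document"},
--     {"status": "parsing", "label": "Parsing", "description": "AI parsing CV content"},
--     {"status": "mapping", "label": "Mapping", "description": "Mapping skills to taxonomy"},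
--     {"status": "storing", "label": "Storing", "description": "Saving to database"},
--     {"status": "indexing", "label": "Indexing", "description": "Indexing for search"},
--     {"status": "completed", "label": "Completed", "description": "Processing complete"},
-- ]
--
-- _N = len(PROCESSING_STEPS)
--
--
-- def _attach(states):
--     return [dict(step, state=s) for step, s in zip(PROCESSING_STEPS, states)]
--
--
-- _ALL_PENDING = _attach(["pending"] * _N)
--
-- # Full answer precomputed once per status; "completed" overwrites its run-rule entry
-- # with the all-completed vector, matching the function's special case.
-- STEPS_BY_STATUS = {
--     step["status"]: _attach(["completed"] * i + ["current"] + ["pending"] * (_N - i - 1))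
--     for i, step in enumerate(PROCESSING_STEPS)
-- }
-- STEPS_BY_STATUS["completed"] = _attach(["completed"] * _N)
--
--
-- def get_steps_with_state(current_status: str) -> list:
--     """Get steps array with current state indicators."""
--     return STEPS_BY_STATUS.get(current_status, _ALL_PENDING)
-- ===== Notes on version B (the rewrite author's own statement) =====
-- stated objective: alternative
-- what changed: B precomputes the complete answer for every status once at module load (a table keyed by status, with an all-pending default covering 'failed' and unknown statuses), so the function itself is a single dict lookup instead of A's per-call loop with a per-element conditional.
import Mathlib
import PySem

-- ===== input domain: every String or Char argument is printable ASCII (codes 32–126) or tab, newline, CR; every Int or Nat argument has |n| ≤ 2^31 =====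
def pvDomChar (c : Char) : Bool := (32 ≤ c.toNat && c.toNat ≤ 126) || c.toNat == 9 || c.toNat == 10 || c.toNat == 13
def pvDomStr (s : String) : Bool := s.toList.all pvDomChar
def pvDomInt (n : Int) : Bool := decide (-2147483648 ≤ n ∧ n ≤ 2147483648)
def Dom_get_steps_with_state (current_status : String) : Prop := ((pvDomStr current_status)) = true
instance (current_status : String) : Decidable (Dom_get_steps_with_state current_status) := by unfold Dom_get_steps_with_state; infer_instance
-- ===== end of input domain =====

-- B precomputes the complete answer per status in a table built once (all-pending default),
-- so the function is a single dict lookup instead of A's per-call loop (objective: alternative).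
-- Return-value equivalence only: Python B returns a shared precomputed list, A a fresh one.


-- ===== PORT A =====
def PROCESSING_STEPS : List (List (String × String)) := [
  [("status","uploading"),("label","Uploading"),("description","Uploading CV to storage")],
  [("status","pending"),("label","Queued"),("description","CV queued for processing")],
  [("status","extracting"),("label","Extracting"),("description","Extracting text from document")],
  [("status","parsing"),("label","Parsing"),("description","AI parsing CV content")],
  [("status","mapping"),("label","Mapping"),("description","Mapping skills to taxonomy")],
  [("status","storing"),("label","Storing"),("description","Saving to database")],
  [("status","indexing"),("label","Indexing"),("description","Indexing for search")],
  [("status","completed"),("label","Completed"),("description","Processing complete")]]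

-- step["key"]: exact here because every literal step dict carries the key (get? never none)
def stepGet (step : List (String × String)) (k : String) : String :=
  (PySem.Dict.ofList step).getD k ""

-- {step["status"]: i for i, step in enumerate(PROCESSING_STEPS)}
def STATUS_ORDER : PySem.Dict String Int :=
  (PySem.List.enumerate PROCESSING_STEPS).foldl
    (fun d p => d.insert (stepGet p.2 "status") p.1) PySem.Dict.empty

def get_steps_with_state (current_status : String) : List (List (String × String)) :=
  let current_idx := STATUS_ORDER.getD current_status (-1)
  let is_failed := current_status == "failed"
  let is_completed := current_status == "completed"
  (PySem.List.enumerate PROCESSING_STEPS).foldl (fun steps p =>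
    let i := p.1
    let step := p.2
    let state :=
      if is_failed then (if i == current_idx then "failed" else if i < current_idx then "completed" else "pending")
      else if is_completed then "completed"
      else if i < current_idx then "completed"
      else if i == current_idx then "current"
      else "pending"
    steps ++ [[("status", stepGet step "status"), ("label", stepGet step "label"),
               ("description", stepGet step "description"), ("state", state)]]) []

-- ===== PORT B =====
def pvN : Int := PROCESSING_STEPS.length

-- _attach(states): [dict(step, state=s) for step, s in zip(PROCESSING_STEPS, states)]
def attachStates (states : List String) : List (List (String × String)) :=
  (PROCESSING_STEPS.zip states).map (fun p =>
    [("status", stepGet p.1 "status"), ("label", stepGet p.1 "label"),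
     ("description", stepGet p.1 "description"), ("state", p.2)])

def ALL_PENDING : List (List (String × String)) :=
  attachStates (List.replicate pvN.toNat "pending")

-- table keyed by status; the "completed" entry is overwritten with the all-completed vector
def STEPS_BY_STATUS : PySem.Dict String (List (List (String × String))) :=
  ((PySem.List.enumerate PROCESSING_STEPS).foldl
    (fun d p => d.insert (stepGet p.2 "status")
      (attachStates (List.replicate p.1.toNat "completed" ++ ["current"] ++
        List.replicate (pvN - p.1 - 1).toNat "pending")))
    PySem.Dict.empty).insert "completed" (attachStates (List.replicate pvN.toNat "completed"))

def get_steps_with_state_alt (current_status : String) : List (List (String × String)) :=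
  STEPS_BY_STATUS.getD current_status ALL_PENDING

-- ===== PRECONDITION & SPEC =====
def Spec_get_steps_with_state (current_status : String) (out : List (List (String × String))) : Prop := out = get_steps_with_state_alt current_status
instance (current_status : String) (out : List (List (String × String))) : Decidable (Spec_get_steps_with_state current_status out) := by unfold Spec_get_steps_with_state; infer_instance

-- ===== CLAIM =====
def Claim_equal_get_steps_with_state : Prop := ∀ (current_status : String), Dom_get_steps_with_state current_status → Spec_get_steps_with_state current_status (get_steps_with_state current_status)

-- ===== LEMMAS AND PROOFS =====

-- Statuses outside the tables (including "failed"): A's idx is -1 (all-"pending"),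
-- B falls back to the ALL_PENDING default.
theorem gsws_default (s : String) (h8 : s ≠ "completed") (hf : s ≠ "failed")
    (h0 : s ≠ "uploading") (h1 : s ≠ "pending") (h2 : s ≠ "extracting") (h3 : s ≠ "parsing")
    (h4 : s ≠ "mapping") (h5 : s ≠ "storing") (h6 : s ≠ "indexing") :
    get_steps_with_state s = get_steps_with_state_alt s := by
  have e0 : stepGet [("status","uploading"),("label","Uploading"),("description","Uploading CV to storage")] "status" = "uploading" := by decide
  have e1 : stepGet [("status","pending"),("label","Queued"),("description","CV queued for processing")] "status" = "pending" := by decide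
  have e2 : stepGet [("status","extracting"),("label","Extracting"),("description","Extracting text from document")] "status" = "extracting" := by decide
  have e3 : stepGet [("status","parsing"),("label","Parsing"),("description","AI parsing CV content")] "status" = "parsing" := by decide
  have e4 : stepGet [("status","mapping"),("label","Mapping"),("description","Mapping skills to taxonomy")] "status" = "mapping" := by decide
  have e5 : stepGet [("status","storing"),("label","Storing"),("description","Saving to database")] "status" = "storing" := by decide
  have e6 : stepGet [("status","indexing"),("label","Indexing"),("description","Indexing for search")] "status" = "indexing" := by decide
  have e7 : stepGet [("status","completed"),("label","Completed"),("description","Processing complete")] "status" = "completed" := by decide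
  have hso : STATUS_ORDER.getD s (-1) = -1 := by
    simp [STATUS_ORDER, PROCESSING_STEPS, PySem.List.enumerate, PySem.Dict.getD_insert,
      e0,e1,e2,e3,e4,e5,e6,e7, h0,h1,h2,h3,h4,h5,h6,h8]
  have hsb : STEPS_BY_STATUS.getD s ALL_PENDING = ALL_PENDING := by
    simp [STEPS_BY_STATUS, PROCESSING_STEPS, PySem.List.enumerate, PySem.Dict.getD_insert,
      e0,e1,e2,e3,e4,e5,e6,e7, h0,h1,h2,h3,h4,h5,h6,h8]
  simp [get_steps_with_state, get_steps_with_state_alt, hso, hsb, h8, hf]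
  decide

-- ===== VERDICT =====
theorem get_steps_with_state_spec : Claim_equal_get_steps_with_state := by
  intro s _
  unfold Spec_get_steps_with_state
  by_cases h8 : s = "completed"; · subst h8; decide
  by_cases hf : s = "failed"; · subst hf; decide
  by_cases h0 : s = "uploading"; · subst h0; decide
  by_cases h1 : s = "pending"; · subst h1; decide
  by_cases h2 : s = "extracting"; · subst h2; decide
  by_cases h3 : s = "parsing"; · subst h3; decide
  by_cases h4 : s = "mapping"; · subst h4; decide
  by_cases h5 : s = "storing"; · subst h5; decide
  by_cases h6 : s = "indexing"; · subst h6; decide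
  exact gsws_default s h8 hf h0 h1 h2 h3 h4 h5 h6
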